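-- pv_equiv track=rewrite | github.com/samuelwoelfl/Notion-Charts | notion_charts_legacy.py | delete_empty_columns
-- ===== SOURCE A (Python) =====
-- def delete_empty_columns(data):
--     indexes = []
--     for ri, r in enumerate(data[1:]):
--         for ci, c in enumerate(r):
--             if c == "" and ri == 0:
--                 indexes.append(ci)
--             elif c != "" and ci in indexes:
--                 indexes.remove(ci)
--     for ri, r in enumerate(data):
--         for i in sorted(indexes, reverse=True):
--             r.pop(i)
--     return data
-- ===== SOURCE B (Python) =====
-- def delete_empty_columns(data):
--     # Return-value equivalent to A; builds new rows instead of mutating data in place.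
--     if len(data) <= 1:
--         return data
--     rows = data[1:]
--     to_delete = [ci for ci in range(len(data[1]))
--                  if all(r[ci] == "" for r in rows if ci < len(r))]
--     return [[c for ci, c in enumerate(r) if ci not in to_delete] for r in data]
-- ===== Notes on version B (the rewrite author's own statement) =====
-- stated objective: alternative
-- what changed: Replaces A's rows-outer sweep that incrementally appends/removes a maintained index list and its descending in-place pop loop by a columns-outer short-circuiting scan computing the delete set directly plus an index-filtering row rebuild; equivalence is about the return value only (A mutates data in place, B builds new rows).
import Mathlib
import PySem

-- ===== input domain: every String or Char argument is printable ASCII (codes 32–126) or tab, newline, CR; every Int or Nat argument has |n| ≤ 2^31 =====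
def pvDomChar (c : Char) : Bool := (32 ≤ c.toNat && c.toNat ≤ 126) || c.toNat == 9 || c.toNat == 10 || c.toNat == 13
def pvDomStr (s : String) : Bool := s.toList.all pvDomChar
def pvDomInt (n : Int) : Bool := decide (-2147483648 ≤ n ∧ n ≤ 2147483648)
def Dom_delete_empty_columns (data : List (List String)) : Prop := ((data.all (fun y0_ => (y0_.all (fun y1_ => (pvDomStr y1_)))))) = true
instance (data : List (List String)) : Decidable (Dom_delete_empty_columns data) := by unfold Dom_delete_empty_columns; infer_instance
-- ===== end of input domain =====

-- B replaces A's rows-outer append/remove sweep and descending pop loop by a columns-outer scan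
-- plus an index-filtering row rebuild (alternative decomposition); equivalence is about the
-- RETURN value only: A mutates the rows of `data` in place, B builds new rows.

-- ===== PORT A =====
-- inner loop body of A's first sweep (one cell (ci, c) at data-row index ri)
def pvStepCell (ri : Int) (a : List Int) (p : Int × String) : List Int :=
  if p.2 == "" && ri == 0 then a ++ [p.1]
  else if p.2 != "" && a.contains p.1 then (PySem.List.remove? a p.1).getD a
  else a

-- 'for ci, c in enumerate(r): …'
def pvStepRow (ri : Int) (indexes : List Int) (r : List String) : List Int :=
  (PySem.List.enumerate r).foldl (pvStepCell ri) indexes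

-- r.pop(i); under Pre_ every pop succeeds, so the getD fallback is never taken there
def pvPop (row : List String) (i : Int) : List String :=
  ((PySem.List.pop? row i).map Prod.snd).getD row

-- data[1:] is data.drop 1 (slice with nonnegative start); the second loop's `ri` is unused in A
def delete_empty_columns (data : List (List String)) : List (List String) :=
  let indexes := (PySem.List.enumerate (data.drop 1)).foldl (fun a p => pvStepRow p.1 a p.2) []
  data.map (fun r => (PySem.List.sorted indexes (fun x => x) true).foldl pvPop r)

-- ===== PORT B =====
def delete_empty_columns_alt (data : List (List String)) : List (List String) :=
  if data.length ≤ 1 then data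
  else
    let rows := data.drop 1
    let to_delete := (PySem.List.pyRange 0 (((PySem.List.pyGet? data 1).getD []).length : Int) 1).filter
      (fun ci => rows.all (fun r =>
        if ci < (r.length : Int) then ((PySem.List.pyGet? r ci).getD "") == "" else true))
    data.map (fun r =>
      ((PySem.List.enumerate r).filter (fun p => !(to_delete.contains p.1))).map (·.2))

-- ===== PRECONDITION & SPEC =====
-- Pre_ excludes exactly the ragged inputs on which A's r.pop(i) raises IndexError: some row is
-- shorter than the index of a column (of data[1]) that is empty throughout the data rows.
def Pre_delete_empty_columns (data : List (List String)) : Prop :=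
  ∀ r ∈ data, ∀ ci : Nat, ci < ((PySem.List.pyGet? data 1).getD []).length →
    ((data.drop 1).all (fun rr => decide (rr.length ≤ ci) || rr.getD ci "" == "")) = true →
    ci < r.length
instance (data : List (List String)) : Decidable (Pre_delete_empty_columns data) := by
  unfold Pre_delete_empty_columns; infer_instance

def pvWitness_delete_empty_columns : List (List String) := [["a", "b"], ["x", ""], ["y", ""]]

def Spec_delete_empty_columns (data : List (List String)) (out : List (List String)) : Prop :=
  out = delete_empty_columns_alt data
instance (data : List (List String)) (out : List (List String)) : Decidable (Spec_delete_empty_columns data out) := by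
  unfold Spec_delete_empty_columns; infer_instance

-- ===== CLAIM (what is proved, stated in full; the proofs are below) =====
def Claim_equal_delete_empty_columns : Prop := ∀ (data : List (List String)), Dom_delete_empty_columns data → Pre_delete_empty_columns data → Spec_delete_empty_columns data (delete_empty_columns data)

-- ===== LEMMAS AND PROOFS =====

-- keep/drop verdict of one later row r (cells based at index s) on a candidate column index x:
-- x survives the row iff its cell, when present, is empty
def pvKeep : List String → Int → Int → Bool
  | [], _, _ => true
  | c :: t, s, x => if x == s then c == "" else pvKeep t (s + 1) x

theorem pvKeep_of_lt (r : List String) (s x : Int) (h : x < s) : pvKeep r s x = true := by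
  induction r generalizing s with
  | nil => rfl
  | cons c t ih =>
      simp only [pvKeep]
      rw [if_neg (by simp; omega)]
      exact ih (s + 1) (by omega)

theorem pvKeep_eq (r : List String) (s x : Int) :
    pvKeep r s x =
      if s ≤ x ∧ x < s + r.length then ((PySem.List.pyGet? r (x - s)).getD "") == "" else true := by
  induction r generalizing s with
  | nil => simp [pvKeep]; omega
  | cons c t ih =>
      by_cases hx : x = s
      · subst hx
        simp [pvKeep]
      · simp only [pvKeep, beq_iff_eq, if_neg hx, ih (s + 1)]
        by_cases hlt : x < s
        · rw [if_neg (by omega), if_neg (by omega)]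
        · have h1 : s + 1 ≤ x := by omega
          by_cases hub : x < s + 1 + t.length
          · rw [if_pos ⟨h1, hub⟩, if_pos (by simp; omega)]
            have : x - s = (x - (s+1)) + 1 := by omega
            rw [this]
            have h2 : x - (s+1) = ((x - (s+1)).toNat : Int) := by omega
            rw [h2, PySem.List.pyGet?_cons_succ]
          · rw [if_neg (by omega), if_neg (by simp; omega)]

-- A's first sweep over the first data row only appends the indices of its empty cells
theorem pvStepRow_zero (r : List String) (s : Int) (idxs : List Int)
    (h : ∀ x ∈ idxs, x < s) :
    (PySem.List.enumerate r s).foldl (pvStepCell 0) idxs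
      = idxs ++ ((PySem.List.enumerate r s).filter (fun p => p.2 == "")).map (·.1) := by
  induction r generalizing s idxs with
  | nil => simp [PySem.List.enumerate_nil]
  | cons c t ih =>
      rw [PySem.List.enumerate_cons]
      by_cases hc : c = ""
      · subst hc
        simp only [List.foldl_cons, pvStepCell, List.filter_cons]
        norm_num
        rw [ih (s+1) (idxs ++ [s]) (by intro x hx; rcases List.mem_append.1 hx with h1 | h1
                                       · exact lt_trans (h x h1) (by omega)
                                       · simp at h1; omega)]
        simp
      · simp only [List.foldl_cons, pvStepCell, List.filter_cons]
        have hmem : s ∉ idxs := fun hcon => absurd (h s hcon) (by omega)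
        norm_num [hc]
        rw [if_neg hmem, ih (s+1) idxs (fun x hx => lt_trans (h x hx) (by omega))]

-- A's sweep over a later data row filters the maintained index list by pvKeep
theorem pvStepRow_pos (r : List String) (s : Int) (idxs : List Int) (hnd : idxs.Nodup)
    (ri : Int) (hri : (ri == 0) = false) :
    (PySem.List.enumerate r s).foldl (pvStepCell ri) idxs = idxs.filter (pvKeep r s) := by
  induction r generalizing s idxs with
  | nil => simp [PySem.List.enumerate_nil, pvKeep]
  | cons c t ih =>
      rw [PySem.List.enumerate_cons]
      simp only [List.foldl_cons, pvStepCell, hri, Bool.and_false, if_neg Bool.false_ne_true]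
      by_cases hc : c = ""
      · subst hc
        norm_num
        rw [ih (s+1) idxs hnd]
        apply List.filter_congr
        intro x _
        simp only [pvKeep]
        by_cases hx : x = s
        · subst hx; rw [if_pos (by simp)]; simp [pvKeep_of_lt t (x+1) x (by omega)]
        · rw [if_neg (by simp [hx])]
      · norm_num [hc]
        have hstep : (if s ∈ idxs then (PySem.List.remove? idxs s).getD idxs else idxs)
            = idxs.filter (fun x => !(x == s)) := by
          by_cases hm : s ∈ idxs
          · rw [if_pos hm, PySem.List.remove?_eq_some_erase idxs s hm]
            simpa using hnd.erase_eq_filter s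
          · rw [if_neg hm, eq_comm, List.filter_eq_self]
            intro a ha
            simp only [Bool.not_eq_eq_eq_not, Bool.not_true, beq_eq_false_iff_ne]
            exact fun e => hm (e ▸ ha)
        rw [hstep, ih (s+1) _ (hnd.filter _), List.filter_filter]
        apply List.filter_congr
        intro x _
        simp only [pvKeep]
        by_cases hx : x = s
        · subst hx; simp [hc]
        · simp [hx]

-- A's outer sweep over the data rows after the first: a chain of pvKeep filters
theorem pvOuter (rows : List (List String)) (s : Int) (hs : 1 ≤ s) (idxs : List Int)
    (hnd : idxs.Nodup) :
    (PySem.List.enumerate rows s).foldl (fun a p => pvStepRow p.1 a p.2) idxs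
      = idxs.filter (fun x => rows.all (fun r => pvKeep r 0 x)) := by
  induction rows generalizing s idxs with
  | nil => simp [PySem.List.enumerate_nil]
  | cons r rows ih =>
      rw [PySem.List.enumerate_cons, List.foldl_cons]
      have h1 : pvStepRow s idxs r = idxs.filter (pvKeep r 0) :=
        pvStepRow_pos r 0 idxs hnd s (by simp; omega)
      rw [h1, ih (s+1) (by omega) _ (hnd.filter _), List.filter_filter]
      apply List.filter_congr
      intro x _
      simp [Bool.and_comm]

-- when every index in Ds lies below the enumeration base, the filter keeps everything
theorem pvFilterEnumAll (xs : List String) (s : Int) (Ds : List Int)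
    (h : ∀ j ∈ Ds, j < s) :
    ((PySem.List.enumerate xs s).filter (fun p => !(Ds.contains p.1))).map (·.2) = xs := by
  have : (PySem.List.enumerate xs s).filter (fun p => !(Ds.contains p.1))
      = PySem.List.enumerate xs s := by
    rw [List.filter_eq_self]
    intro p hp
    rcases (PySem.List.mem_enumerate_iff xs s p).1 hp with ⟨k, hk, rfl⟩
    have hnm : (s + (k : Int)) ∉ Ds := fun hmem => by have := h _ hmem; omega
    simp [hnm]
  rw [this, PySem.List.map_snd_enumerate]

-- popping a strictly descending, in-range index list = keeping the cells at other indices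
theorem pvPopFold (Ds : List Int) (r : List String) (hp : Ds.Pairwise (· > ·))
    (hb : ∀ i ∈ Ds, 0 ≤ i ∧ i < (r.length : Int)) :
    Ds.foldl pvPop r
      = ((PySem.List.enumerate r).filter (fun p => !(Ds.contains p.1))).map (·.2) := by
  induction Ds generalizing r with
  | nil =>
      rw [List.foldl_nil]
      exact (pvFilterEnumAll r 0 [] (fun j hj => absurd hj (List.not_mem_nil))).symm
  | cons i Ds ih =>
      obtain ⟨hi0, hilen⟩ := hb i (List.mem_cons_self ..)
      have hin : i = (i.toNat : Int) := by omega
      set n := i.toNat with hn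
      have hnlen : n < r.length := by omega
      rw [List.foldl_cons]
      have hpop : pvPop r i = r.eraseIdx n := by
        rw [pvPop, hin, PySem.List.pop?_natCast r n hnlen]
        rfl
      rw [hpop]
      have hDs_lt : ∀ j ∈ Ds, j < i := fun j hj => List.rel_of_pairwise_cons hp hj
      have hb' : ∀ j ∈ Ds, 0 ≤ j ∧ j < ((r.eraseIdx n).length : Int) := by
        intro j hj
        obtain ⟨h0, _⟩ := hb j (List.mem_cons_of_mem _ hj)
        have h2 := hDs_lt j hj
        rw [List.length_eraseIdx_of_lt hnlen]
        refine ⟨h0, by omega⟩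
      rw [ih _ hp.of_cons hb']
      have hsplit : r = r.take n ++ r[n] :: r.drop (n + 1) := by
        conv_lhs => rw [← List.take_append_drop n r]
        rw [List.drop_eq_getElem_cons hnlen]
      have htake : (r.take n).length = n := List.length_take_of_le (le_of_lt hnlen)
      have herase : r.eraseIdx n = r.take n ++ r.drop (n + 1) :=
        List.eraseIdx_eq_take_drop_succ r n
      rw [herase, PySem.List.enumerate_append, List.filter_append, List.map_append,
        htake, pvFilterEnumAll (r.drop (n+1)) ((0:Int) + (n : Int)) Ds
          (by intro j hj; have := hDs_lt j hj; omega)]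
      conv_rhs => rw [hsplit, PySem.List.enumerate_append, htake]
      rw [PySem.List.enumerate_cons, List.filter_append, List.map_append, List.filter_cons]
      have hihd : ((i :: Ds).contains ((0 : Int) + (n : Int))) = true := by
        simp [hin]
      simp only [hihd, Bool.not_true, Bool.false_eq_true, reduceIte]
      rw [pvFilterEnumAll (r.drop (n+1)) ((0:Int) + (n : Int) + 1) (i :: Ds) (by
        intro j hj
        rcases List.mem_cons.1 hj with rfl | hj'
        · omega
        · have := hDs_lt j hj'; omega)]
      congr 1
      apply congrArg
      apply List.filter_congr
      intro p hpm
      rcases (PySem.List.mem_enumerate_iff _ _ p).1 hpm with ⟨k, hk, rfl⟩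
      have hkn : (k : Int) < n := by rw [htake] at hk; exact_mod_cast hk
      simp only [List.contains_cons]
      have : ((0 : Int) + (k : Int) == i) = false := by simp; omega
      rw [this, Bool.false_or]

-- ===== VERDICT (by name: the statement is the Claim_ definition above) =====
theorem delete_empty_columns_spec : Claim_equal_delete_empty_columns := by
  intro data _hdom hpre
  unfold Spec_delete_empty_columns
  rcases data with _ | ⟨h, _ | ⟨r1, rest⟩⟩
  · rfl
  · rfl
  · have hget : PySem.List.pyGet? (h :: r1 :: rest) 1 = some r1 := by
      have h1 : (1 : Int) = ((1 : Nat) : Int) := by norm_num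
      rw [h1, PySem.List.pyGet?_natCast]; rfl
    set D0 : List Int := ((PySem.List.enumerate r1).filter (fun p => p.2 == "")).map (·.1) with hD0def
    have hD0 : pvStepRow 0 [] r1 = D0 := by
      rw [pvStepRow, pvStepRow_zero r1 0 [] (by simp), List.nil_append]
    have hD0lt : D0.Pairwise (· < ·) := by
      refine List.Pairwise.map _ (fun a b hab => hab)
        (List.Pairwise.sublist List.filter_sublist (PySem.List.pairwise_lt_enumerate r1 0))
    have hD0nd : D0.Nodup := hD0lt.imp (fun hab => ne_of_lt hab)
    set Dfin : List Int := D0.filter (fun x => rest.all (fun r => pvKeep r 0 x)) with hDfin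
    have hDlt : Dfin.Pairwise (· < ·) := List.Pairwise.sublist List.filter_sublist hD0lt
    have hidx : (PySem.List.enumerate (r1 :: rest)).foldl
        (fun a p => pvStepRow p.1 a p.2) [] = Dfin := by
      rw [PySem.List.enumerate_cons, List.foldl_cons, hD0,
        pvOuter rest (0+1) (by omega) D0 hD0nd]
    have hbound : ∀ x ∈ Dfin, ∀ r ∈ (h :: r1 :: rest), 0 ≤ x ∧ x < (r.length : Int) := by
      intro x hx r hr
      rw [hDfin, List.mem_filter] at hx
      obtain ⟨hx0, hallx⟩ := hx
      rw [hD0def, List.mem_map] at hx0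
      obtain ⟨p, hpf, rfl⟩ := hx0
      rw [List.mem_filter] at hpf
      obtain ⟨hpe, hpemp⟩ := hpf
      rcases (PySem.List.mem_enumerate_iff _ _ p).1 hpe with ⟨k, hk, rfl⟩
      have hklen : k < ((PySem.List.pyGet? (h :: r1 :: rest) 1).getD []).length := by
        rw [hget]; simpa using hk
      have hall : (((h :: r1 :: rest).drop 1).all
          (fun rr => decide (rr.length ≤ k) || rr.getD k "" == "")) = true := by
        rw [List.drop_succ_cons, List.drop_zero, List.all_cons]
        refine Bool.and_eq_true_iff.2 ⟨?_, ?_⟩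
        · have : r1.getD k "" = r1[k] := List.getD_eq_getElem r1 "" hk
          simp only [this]
          simp at hpemp
          simp [hpemp]
        · rw [List.all_eq_true] at hallx ⊢
          intro rr hrr
          have hkeep := hallx rr hrr
          rw [pvKeep_eq] at hkeep
          by_cases hlt : k < rr.length
          · rw [if_pos (by omega)] at hkeep
            have hg : PySem.List.pyGet? rr (0 + (k : Int) - 0) = rr[k]? := by
              rw [show (0 + (k : Int) - 0) = ((k : Nat) : Int) by omega, PySem.List.pyGet?_natCast]
            rw [hg] at hkeep
            have : rr.getD k "" = rr[k] := List.getD_eq_getElem rr "" hlt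
            simp only [this]
            simp only [List.getElem?_eq_getElem hlt, Option.getD_some] at hkeep
            simp [hkeep]
          · simp [Nat.le_of_not_lt hlt]
      have := hpre r hr k hklen hall
      constructor <;> omega
    have hsorted : PySem.List.sorted Dfin (fun x => x) true = Dfin.reverse := by
      apply PySem.List.sorted_rev_eq_of_perm_of_pairwise_gt
      · exact List.reverse_perm Dfin
      · rw [List.pairwise_reverse]
        exact hDlt
    have hrowA : ∀ r ∈ (h :: r1 :: rest),
        (PySem.List.sorted Dfin (fun x => x) true).foldl pvPop r
          = ((PySem.List.enumerate r).filter (fun p => !(Dfin.contains p.1))).map (·.2) := by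
      intro r hr
      rw [hsorted, pvPopFold Dfin.reverse r
        (by rw [List.pairwise_reverse]; exact hDlt)
        (fun i hi => hbound i (List.mem_reverse.1 hi) r hr)]
      congr 1
      apply List.filter_congr
      intro p _
      simp
    have hDeq : Dfin = (PySem.List.pyRange 0
        (((PySem.List.pyGet? (h :: r1 :: rest) 1).getD []).length : Int) 1).filter
        (fun ci => (r1 :: rest).all
          (fun r => if ci < (r.length : Int) then ((PySem.List.pyGet? r ci).getD "") == "" else true)) := by
      rw [hget]
      have hEnum : PySem.List.enumerate r1
          = (PySem.List.pyRange 0 (PySem.List.len r1) 1).map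
              (fun j => (j, PySem.List.pyGetD r1 j "")) :=
        PySem.List.enumerate_eq_map_pyRange r1 ""
      rw [hDfin, hD0def, hEnum, List.filter_map, List.filter_filter, List.filter_map, List.map_map]
      simp only [Function.comp_def, PySem.List.len_eq, Option.getD_some]
      simp only [List.map_id']
      apply List.filter_congr
      intro ci hci
      rw [PySem.List.mem_pyRange_one] at hci
      obtain ⟨hci0, hciN⟩ := hci
      rw [List.all_cons]
      have hkr : ∀ rr : List String, pvKeep rr 0 ci
          = (if ci < (rr.length : Int) then ((PySem.List.pyGet? rr ci).getD "") == "" else true) := by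
        intro rr
        rw [pvKeep_eq]
        by_cases hlt : ci < (rr.length : Int)
        · rw [if_pos (by omega), if_pos hlt, sub_zero]
        · rw [if_neg (by omega), if_neg hlt]
      have hleft : (PySem.List.pyGetD r1 ci "" == "")
          = (if ci < ((r1.length : Nat) : Int) then ((PySem.List.pyGet? r1 ci).getD "") == "" else true) := by
        rw [if_pos hciN, show ci = ((ci.toNat : Nat) : Int) by omega,
          PySem.List.pyGetD_natCast, PySem.List.pyGet?_natCast, List.getD_eq_getElem?_getD]
      rw [show (fun r => pvKeep r 0 ci) = (fun rr : List String =>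
        if ci < (rr.length : Int) then ((PySem.List.pyGet? rr ci).getD "") == "" else true) from funext hkr]
      rw [← hleft]
      exact Bool.and_comm _ _
    simp only [delete_empty_columns, delete_empty_columns_alt, List.drop_succ_cons, List.drop_zero]
    rw [hidx, if_neg (by simp)]
    rw [← hDeq]
    exact List.map_congr_left hrowA
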